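-- pv_equiv track=rewrite | github.com/Zaczero/osm-relatify | overpass.py | _split_way_on_intersection
-- ===== SOURCE A (Python) =====
-- from collections.abc import Iterable, Mapping, Sequence
--
-- def _split_way_on_intersection(way: dict, node_counts: Mapping[int, int]) -> list[list[int]]:
--     segments: list[list[int]] = []
--     current_segment: list[int] = []
--
--     for node in way['nodes']:
--         current_segment.append(node)
--
--         if node_counts[node] > 1 and len(current_segment) > 1:
--             segments.append(current_segment)
--             current_segment = [node]
--
--     if len(current_segment) > 1:
--         segments.append(current_segment)
--
--     return segments
-- ===== SOURCE B (Python) =====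
-- def _split_way_on_intersection(way, node_counts):
--     nodes = way['nodes']
--     splits = [i for i, n in enumerate(nodes) if node_counts[n] > 1 and i > 0]
--     segments = []
--     prev = 0
--     for s in splits:
--         segments.append(nodes[prev:s + 1])
--         prev = s
--     if len(nodes) - prev > 1:
--         segments.append(nodes[prev:])
--     return segments
-- ===== Notes on version B (the rewrite author's own statement) =====
-- stated objective: alternative
-- what changed: Replaces the online append-and-cut accumulator loop by a two-pass scheme: first collect the split indices (i>0 with node count > 1), then build each segment by slicing the node list between consecutive split indices.
import Mathlib
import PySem

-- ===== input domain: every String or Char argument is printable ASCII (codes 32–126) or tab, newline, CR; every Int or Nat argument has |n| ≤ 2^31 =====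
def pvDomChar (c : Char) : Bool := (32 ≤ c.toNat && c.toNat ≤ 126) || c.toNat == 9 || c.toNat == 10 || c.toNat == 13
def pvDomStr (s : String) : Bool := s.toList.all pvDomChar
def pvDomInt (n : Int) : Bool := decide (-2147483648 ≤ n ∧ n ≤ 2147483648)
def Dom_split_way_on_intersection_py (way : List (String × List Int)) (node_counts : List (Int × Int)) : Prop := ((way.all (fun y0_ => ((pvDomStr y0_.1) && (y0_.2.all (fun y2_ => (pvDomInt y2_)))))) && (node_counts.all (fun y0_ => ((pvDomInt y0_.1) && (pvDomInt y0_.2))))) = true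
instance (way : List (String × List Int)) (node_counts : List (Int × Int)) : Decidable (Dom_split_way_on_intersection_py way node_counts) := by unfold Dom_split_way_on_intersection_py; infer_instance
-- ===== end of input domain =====

-- B replaces A's online append-and-cut accumulator loop by an index-collection pass
-- followed by a slicing pass (same cost; objective: alternative decomposition).


-- ===== PORT A =====
-- A's for-loop over way['nodes'] with accumulators (segments, current_segment).
def pyAGo (nc : PySem.Dict Int Int) (segs : List (List Int)) (cur : List Int) : List Int → List (List Int)
  | [] => if cur.length > 1 then segs ++ [cur] else segs
  | n :: ns =>
    let c := cur ++ [n]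
    if nc.getD n 0 > 1 ∧ c.length > 1 then pyAGo nc (segs ++ [c]) [n] ns
    else pyAGo nc segs c ns

-- way['nodes'] / node_counts[node]: missing keys raise in Python; those inputs are excluded by Pre_ below.
def split_way_on_intersection_py (way : List (String × List Int)) (node_counts : List (Int × Int)) : List (List Int) :=
  match (PySem.Dict.ofList way).get? "nodes" with
  | none => []
  | some nodes => pyAGo (PySem.Dict.ofList node_counts) [] [] nodes

-- ===== PORT B =====
def bStep (nodes : List Int) (st : List (List Int) × Int) (s : Int) : List (List Int) × Int :=
  (st.1 ++ [PySem.List.slice nodes (some st.2) (some (s + 1))], s)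

def bFinish (nodes : List Int) (st : List (List Int) × Int) : List (List Int) :=
  if (nodes.length : Int) - st.2 > 1 then st.1 ++ [PySem.List.slice nodes (some st.2) none] else st.1

def split_way_on_intersection_py_alt (way : List (String × List Int)) (node_counts : List (Int × Int)) : List (List Int) :=
  let nc := PySem.Dict.ofList node_counts
  match (PySem.Dict.ofList way).get? "nodes" with
  | none => []
  | some nodes =>
    let splits := (PySem.List.enumerate nodes).filterMap
      (fun p => if nc.getD p.2 0 > 1 ∧ p.1 > 0 then some p.1 else none)
    bFinish nodes (splits.foldl (bStep nodes) ([], 0))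

-- ===== PRECONDITION & SPEC =====
-- Pre_ excludes exactly the inputs where Python A raises KeyError: way lacking a 'nodes' key,
-- or some listed node missing from node_counts (B raises there too).
def Pre_split_way_on_intersection_py (way : List (String × List Int)) (node_counts : List (Int × Int)) : Prop :=
  ((PySem.Dict.ofList way).get? "nodes").isSome = true ∧
  ∀ n ∈ ((PySem.Dict.ofList way).get? "nodes").getD [], (PySem.Dict.ofList node_counts).contains n = true
instance (way : List (String × List Int)) (node_counts : List (Int × Int)) : Decidable (Pre_split_way_on_intersection_py way node_counts) := by unfold Pre_split_way_on_intersection_py; infer_instance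

def pvWitness_split_way_on_intersection_py : (List (String × List Int)) × (List (Int × Int)) :=
  ([("nodes", [1, 2, 3, 4])], [(1, 1), (2, 2), (3, 1), (4, 1)])

def Spec_split_way_on_intersection_py (way : List (String × List Int)) (node_counts : List (Int × Int)) (out : List (List Int)) : Prop := out = split_way_on_intersection_py_alt way node_counts
instance (way : List (String × List Int)) (node_counts : List (Int × Int)) (out : List (List Int)) : Decidable (Spec_split_way_on_intersection_py way node_counts out) := by unfold Spec_split_way_on_intersection_py; infer_instance

-- ===== CLAIM (what is proved, stated in full; the proofs are below) =====
def Claim_equal_split_way_on_intersection_py : Prop := ∀ (way : List (String × List Int)) (node_counts : List (Int × Int)), Dom_split_way_on_intersection_py way node_counts → Pre_split_way_on_intersection_py way node_counts → Spec_split_way_on_intersection_py way node_counts (split_way_on_intersection_py way node_counts)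

-- ===== LEMMAS AND PROOFS =====

-- The list of split indices that B's enumerate-filterMap comprehension produces, as a
-- structural recursion carrying the running index k.
def splitsIdx (nc : PySem.Dict Int Int) (k : Nat) : List Int → List Int
  | [] => []
  | n :: ns =>
    if nc.getD n 0 > 1 ∧ 0 < k then (k : Int) :: splitsIdx nc (k + 1) ns
    else splitsIdx nc (k + 1) ns

lemma enum_splits (nc : PySem.Dict Int Int) :
    ∀ (ns : List Int) (k : Nat),
      (PySem.List.enumerate ns (k : Int)).filterMap
          (fun p => if nc.getD p.2 0 > 1 ∧ p.1 > 0 then some p.1 else none)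
        = splitsIdx nc k ns := by
  intro ns
  induction ns with
  | nil => intro k; simp [PySem.List.enumerate, splitsIdx]
  | cons n ns ih =>
    intro k
    rw [PySem.List.enumerate_cons]
    have h1 : ((k : Int) + 1) = ((k + 1 : Nat) : Int) := by push_cast; ring
    simp only [List.filterMap_cons, h1, ih (k + 1), splitsIdx]
    by_cases hb : nc.getD n 0 > 1
    · by_cases hk : 0 < k
      · simp [hb, hk]
      · simp [hb, hk]
    · simp [hb]

lemma aGo_eq (nc : PySem.Dict Int Int) :
    ∀ (rest pref : List Int) (segs : List (List Int)) (p : Nat),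
      p ≤ pref.length → (0 < pref.length → p < pref.length) →
      pyAGo nc segs (pref.drop p) rest
        = bFinish (pref ++ rest)
            ((splitsIdx nc pref.length rest).foldl (bStep (pref ++ rest)) (segs, (p : Int))) := by
  intro rest
  induction rest with
  | nil =>
    intro pref segs p hp _
    simp only [pyAGo, splitsIdx, List.foldl_nil, bFinish, List.append_nil,
      PySem.List.slice_from_natCast, List.length_drop]
    by_cases h : pref.length - p > 1
    · have h' : ((pref.length : Int) - p > 1) := by omega
      simp [h, h']
    · have h' : ¬ ((pref.length : Int) - p > 1) := by omega
      simp [h, h']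
  | cons n ns ih =>
    intro pref segs p hp hp2
    have hdrop : (pref ++ [n]).drop p = pref.drop p ++ [n] :=
      List.drop_append_of_le_length hp
    have hlen : (pref.drop p ++ [n]).length = pref.length - p + 1 := by
      simp [List.length_drop]
    have hassoc : pref ++ [n] ++ ns = pref ++ n :: ns := by simp
    by_cases hb : nc.getD n 0 > 1 ∧ 0 < pref.length
    · -- cut at this node
      have hplt : p < pref.length := hp2 hb.2
      have hcond : nc.getD n 0 > 1 ∧ (pref.drop p ++ [n]).length > 1 := by
        constructor
        · exact hb.1
        · rw [hlen]; omega
      have hslice : PySem.List.slice (pref ++ n :: ns) (some (p : Int))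
          (some ((pref.length : Int) + 1)) = pref.drop p ++ [n] := by
        have : ((pref.length : Int) + 1) = ((pref.length + 1 : Nat) : Int) := by push_cast; ring
        rw [this, PySem.List.slice_natCast]
        rw [List.drop_append_of_le_length hp]
        rw [List.take_append]
        have hl : (pref.drop p).length = pref.length - p := by simp
        have h1 : (pref.drop p).take (pref.length + 1 - p) = pref.drop p :=
          List.take_of_length_le (by omega)
        have h2 : pref.length + 1 - p - (pref.drop p).length = 1 := by rw [hl]; omega
        rw [h1, h2]
        simp
      have hstep : pyAGo nc segs (pref.drop p) (n :: ns)
          = pyAGo nc (segs ++ [pref.drop p ++ [n]]) [n] ns := by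
        simp only [pyAGo]; rw [if_pos hcond]
      have hL : (pref ++ [n]).length = pref.length + 1 := by simp
      have hih := ih (pref ++ [n]) (segs ++ [pref.drop p ++ [n]]) pref.length
        (by rw [hL]; omega) (by intro _; rw [hL]; omega)
      rw [hassoc, hL, List.drop_left] at hih
      rw [hstep, hih]
      simp only [splitsIdx, if_pos hb, List.foldl_cons, bStep, hslice]
    · -- no cut
      have hcond : ¬ (nc.getD n 0 > 1 ∧ (pref.drop p ++ [n]).length > 1) := by
        rw [hlen]; intro ⟨h1, h2⟩; exact hb ⟨h1, by omega⟩
      have hstep : pyAGo nc segs (pref.drop p) (n :: ns)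
          = pyAGo nc segs (pref.drop p ++ [n]) ns := by
        simp only [pyAGo]; rw [if_neg hcond]
      have hL : (pref ++ [n]).length = pref.length + 1 := by simp
      have hih := ih (pref ++ [n]) segs p
        (by rw [hL]; omega) (by intro _; rw [hL]; omega)
      rw [hassoc, hL, hdrop] at hih
      rw [hstep, hih]
      simp only [splitsIdx, if_neg hb]

-- ===== VERDICT (by name: the statement is the Claim_ definition above) =====
theorem split_way_on_intersection_py_spec : Claim_equal_split_way_on_intersection_py := by
  intro way node_counts _ _
  unfold Spec_split_way_on_intersection_py split_way_on_intersection_py split_way_on_intersection_py_alt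
  cases h : (PySem.Dict.ofList way).get? "nodes" with
  | none => rfl
  | some nodes =>
    simp only []
    have henum := enum_splits (PySem.Dict.ofList node_counts) nodes 0
    have hmain := aGo_eq (PySem.Dict.ofList node_counts) nodes [] [] 0
      (by simp) (by simp)
    simp only [List.drop_nil, List.nil_append, List.length_nil, Nat.cast_zero] at hmain
    rw [hmain]
    norm_num at henum ⊢
    rw [henum]
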